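-- pv_equiv track=rewrite | github.com/jimmy876876/ssq_xuanhao | number_predictor.py | get_number_analysis
-- ===== SOURCE A (Python) =====
-- from itertools import combinations
--
-- def get_number_analysis(numbers):
--     """分析生成的号码组合"""
--     red_numbers, blue_ball = numbers
--     analysis = {
--         '和值': sum(red_numbers),
--         '奇号个数': len([x for x in red_numbers if x % 2 == 1]),
--         '偶号个数': len([x for x in red_numbers if x % 2 == 0]),
--         '大号个数': len([x for x in red_numbers if x > 16]),
--         '小号个数': len([x for x in red_numbers if x <= 16]),
--         '连号个数': sum(1 for i in range(len(red_numbers)-1) if red_numbers[i+1] - red_numbers[i] == 1),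
--         'AC值': sum(abs(a - b) for a, b in combinations(red_numbers, 2))
--     }
--     return analysis
-- ===== SOURCE B (Python) =====
-- def get_number_analysis(numbers):
--     """分析生成的号码组合 — arithmetic boolean sums and a sort-based closed form for the AC value"""
--     red_numbers, blue_ball = numbers
--     n = len(red_numbers)
--     odd = sum(x % 2 for x in red_numbers)
--     big = sum(x > 16 for x in red_numbers)
--     consec = sum(b - a == 1 for a, b in zip(red_numbers, red_numbers[1:]))
--     ac = sum((2 * i - (n - 1)) * x for i, x in enumerate(sorted(red_numbers)))
--     return {
--         '和值': sum(red_numbers),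
--         '奇号个数': odd,
--         '偶号个数': n - odd,
--         '大号个数': big,
--         '小号个数': n - big,
--         '连号个数': consec,
--         'AC值': ac,
--     }
-- ===== Notes on version B (the rewrite author's own statement) =====
-- stated objective: faster
-- what changed: Computes the AC value by a sort-based closed form sum((2*i-(n-1))*x over enumerate(sorted(red))), O(n log n) instead of A's O(n^2) pairwise combinations, and replaces A's filter comprehensions by arithmetic boolean sums with even/small derived by complement and consecutive pairs via zip.
import Mathlib
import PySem

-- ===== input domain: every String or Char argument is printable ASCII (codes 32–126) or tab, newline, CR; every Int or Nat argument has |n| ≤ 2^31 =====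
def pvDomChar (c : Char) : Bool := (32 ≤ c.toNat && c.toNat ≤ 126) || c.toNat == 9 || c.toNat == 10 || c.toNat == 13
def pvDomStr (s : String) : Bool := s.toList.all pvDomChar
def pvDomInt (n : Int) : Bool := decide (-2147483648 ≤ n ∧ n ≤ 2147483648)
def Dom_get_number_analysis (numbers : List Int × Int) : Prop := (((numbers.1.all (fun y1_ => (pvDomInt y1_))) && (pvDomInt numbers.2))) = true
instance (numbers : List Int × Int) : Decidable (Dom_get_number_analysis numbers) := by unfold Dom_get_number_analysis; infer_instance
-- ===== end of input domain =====

-- B computes the AC value by the sort-based closed form sum((2*i-(n-1))*x over enumerate(sorted(red))),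
-- O(n log n) vs A's O(n^2) pairwise combinations; the counts become arithmetic boolean sums with
-- even/small by complement and consecutive pairs via zip.

-- ===== PORT A =====
-- itertools.combinations(red, 2), in order
def pvComb2 : List Int → List (Int × Int)
  | [] => []
  | x :: xs => xs.map (fun y => (x, y)) ++ pvComb2 xs

def get_number_analysis (numbers : List Int × Int) : List (String × Int) :=
  let red := numbers.1
  [("和值", red.sum),
   ("奇号个数", ((red.filter (fun x => PySem.Int.mod x 2 == 1)).length : Int)),
   ("偶号个数", ((red.filter (fun x => PySem.Int.mod x 2 == 0)).length : Int)),
   ("大号个数", ((red.filter (fun x => decide (16 < x))).length : Int)),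
   ("小号个数", ((red.filter (fun x => decide (x ≤ 16))).length : Int)),
   ("连号个数", ((PySem.List.pyRange 0 ((red.length : Int) - 1) 1).map
       (fun i => if PySem.List.pyGetD red (i + 1) 0 - PySem.List.pyGetD red i 0 = 1 then (1 : Int) else 0)).sum),
   ("AC值", ((pvComb2 red).map (fun p => |p.1 - p.2|)).sum)]

-- ===== PORT B =====
def get_number_analysis_alt (numbers : List Int × Int) : List (String × Int) :=
  let red := numbers.1
  let n : Int := red.length
  let odd := (red.map (fun x => PySem.Int.mod x 2)).sum
  let big := (red.map (fun x => if 16 < x then (1 : Int) else 0)).sum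
  let consec := ((red.zip (PySem.List.slice red (some 1) none)).map
      (fun p => if p.2 - p.1 = 1 then (1 : Int) else 0)).sum
  let ac := ((PySem.List.enumerate (PySem.List.sorted red (fun x => x) false) 0).map
      (fun p => (2 * p.1 - (n - 1)) * p.2)).sum
  [("和值", red.sum),
   ("奇号个数", odd),
   ("偶号个数", n - odd),
   ("大号个数", big),
   ("小号个数", n - big),
   ("连号个数", consec),
   ("AC值", ac)]

-- ===== PRECONDITION & SPEC =====
def Spec_get_number_analysis (numbers : List Int × Int) (out : List (String × Int)) : Prop := out = get_number_analysis_alt numbers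
instance (numbers : List Int × Int) (out : List (String × Int)) : Decidable (Spec_get_number_analysis numbers out) := by unfold Spec_get_number_analysis; infer_instance

-- ===== CLAIM (what is proved, stated in full; the proofs are below) =====
def Claim_equal_get_number_analysis : Prop := ∀ (numbers : List Int × Int), Dom_get_number_analysis numbers → Spec_get_number_analysis numbers (get_number_analysis numbers)

-- ===== LEMMAS AND PROOFS =====

-- consecutive-pair count with a "previous element" seed
def pvAdjC : Option Int → List Int → Int
  | _, [] => 0
  | p, x :: xs => (match p with | some q => if x - q = 1 then 1 else 0 | none => 0) + pvAdjC (some x) xs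

theorem pv_getD_shift (z : Int) (l : List Int) (j : Int) (h : 0 ≤ j) :
    PySem.List.pyGetD (z :: l) (j + 1) 0 = PySem.List.pyGetD l j 0 := by
  lift j to ℕ using h
  have h1 : ((j : Int) + 1) = ((j + 1 : Nat) : Int) := by push_cast; ring
  rw [h1, PySem.List.pyGetD_natCast, PySem.List.pyGetD_natCast, List.getD_cons_succ]

theorem pv_range_adj (x : Int) (xs : List Int) :
    ((List.range xs.length).map
      (fun (i : Nat) => if PySem.List.pyGetD (x :: xs) ((i : Int) + 1) 0 - PySem.List.pyGetD (x :: xs) (i : Int) 0 = 1 then (1 : Int) else 0)).sum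
      = pvAdjC (some x) xs := by
  induction xs generalizing x with
  | nil => simp [pvAdjC]
  | cons y ys ih =>
    simp only [List.length_cons]
    rw [List.range_succ_eq_map]
    simp only [List.map_cons, List.map_map, List.sum_cons, pvAdjC]
    have head1 : PySem.List.pyGetD (x :: y :: ys) (((0 : Nat) : Int) + 1) 0 = y := by
      rw [pv_getD_shift x (y :: ys) _ (by positivity), PySem.List.pyGetD_natCast]
      rfl
    have head0 : PySem.List.pyGetD (x :: y :: ys) ((0 : Nat) : Int) 0 = x := by
      rw [PySem.List.pyGetD_natCast]
      rfl
    have tail : ((List.range ys.length).map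
        ((fun (i : Nat) => if PySem.List.pyGetD (x :: y :: ys) ((i : Int) + 1) 0 - PySem.List.pyGetD (x :: y :: ys) (i : Int) 0 = 1 then (1 : Int) else 0) ∘ Nat.succ)).sum
        = pvAdjC (some y) ys := by
      rw [← ih y]
      apply congrArg
      apply List.map_congr_left
      intro i _
      simp only [Function.comp_apply, Nat.succ_eq_add_one, Nat.cast_add, Nat.cast_one]
      rw [pv_getD_shift x (y :: ys) ((i : Int) + 1) (by positivity),
        pv_getD_shift x (y :: ys) (i : Int) (Int.natCast_nonneg i)]
    rw [tail, head1, head0]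

-- A's range-indexed consecutive count equals pvAdjC
theorem pv_consec_eq (red : List Int) :
    ((PySem.List.pyRange 0 ((red.length : Int) - 1) 1).map
      (fun i => if PySem.List.pyGetD red (i + 1) 0 - PySem.List.pyGetD red i 0 = 1 then (1 : Int) else 0)).sum
      = pvAdjC none red := by
  cases red with
  | nil => decide
  | cons x xs =>
    have hlen : ((x :: xs).length : Int) - 1 = ((xs.length : Nat) : Int) := by
      simp only [List.length_cons]; push_cast; ring
    rw [hlen, PySem.List.pyRange_zero_natCast, List.map_map]
    have hadj : pvAdjC none (x :: xs) = pvAdjC (some x) xs := by simp [pvAdjC]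
    rw [hadj, ← pv_range_adj x xs]
    rfl

-- B's zip-based consecutive count equals pvAdjC
theorem pv_zip_adj (x : Int) (xs : List Int) :
    (((x :: xs).zip xs).map (fun p => if p.2 - p.1 = 1 then (1 : Int) else 0)).sum
      = pvAdjC (some x) xs := by
  induction xs generalizing x with
  | nil => simp [pvAdjC]
  | cons y ys ih => simp [pvAdjC, ih y]

theorem pv_consec_alt_eq (red : List Int) :
    ((red.zip (PySem.List.slice red (some 1) none)).map
      (fun p => if p.2 - p.1 = 1 then (1 : Int) else 0)).sum = pvAdjC none red := by
  rw [PySem.List.slice_from_one]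
  cases red with
  | nil => rfl
  | cons x xs =>
    have hadj : pvAdjC none (x :: xs) = pvAdjC (some x) xs := by simp [pvAdjC]
    rw [hadj, ← pv_zip_adj x xs]
    rfl

-- boolean sums = counts
theorem pv_sum_mod2 (xs : List Int) :
    (xs.map (fun x => PySem.Int.mod x 2)).sum = (xs.countP (fun x => PySem.Int.mod x 2 == 1) : Int) := by
  have h2 : ∀ y : Int, PySem.Int.mod y 2 = y % 2 := fun y => PySem.Int.mod_eq_emod_of_pos (by norm_num)
  simp only [h2]
  induction xs with
  | nil => rfl
  | cons x xs ih =>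
    simp only [List.map_cons, List.sum_cons, List.countP_cons, ih]
    rcases Int.emod_two_eq x with h | h <;> simp [h] <;> omega

theorem pv_sum_big (xs : List Int) :
    (xs.map (fun x => if 16 < x then (1 : Int) else 0)).sum = (xs.countP (fun x => decide (16 < x)) : Int) := by
  induction xs with
  | nil => rfl
  | cons x xs ih =>
    simp only [List.map_cons, List.sum_cons, List.countP_cons, ih]
    by_cases h : (16 : Int) < x <;> simp [h] <;> omega

theorem pv_count_parity (xs : List Int) :
    xs.countP (fun x => PySem.Int.mod x 2 == 0) + xs.countP (fun x => PySem.Int.mod x 2 == 1) = xs.length := by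
  have h2 : ∀ y : Int, PySem.Int.mod y 2 = y % 2 := fun y => PySem.Int.mod_eq_emod_of_pos (by norm_num)
  simp only [h2]
  induction xs with
  | nil => rfl
  | cons x xs ih =>
    simp only [List.countP_cons, List.length_cons]
    rcases Int.emod_two_eq x with h | h <;> simp [h] <;> omega

theorem pv_count_size (xs : List Int) :
    xs.countP (fun x => decide (x ≤ 16)) + xs.countP (fun x => decide (16 < x)) = xs.length := by
  induction xs with
  | nil => rfl
  | cons x xs ih =>
    simp only [List.countP_cons, List.length_cons]
    by_cases h : (16 : Int) < x <;>
      simp [h, not_le_of_gt, le_of_not_gt] <;> omega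

-- ==== AC value: comb2 sum = sort-based closed form ====

-- the full double sum of |a-b| over two lists
def pvFull (xs ys : List Int) : Int := (xs.map (fun a => (ys.map (fun b => |a - b|)).sum)).sum

theorem pv_sum_map_add {α : Type} (xs : List α) (f g : α → Int) :
    (xs.map (fun x => f x + g x)).sum = (xs.map f).sum + (xs.map g).sum := by
  induction xs with
  | nil => simp
  | cons x xs ih => simp [ih]; ring

theorem pv_two_comb2 (xs : List Int) :
    2 * ((pvComb2 xs).map (fun p => |p.1 - p.2|)).sum = pvFull xs xs := by
  induction xs with
  | nil => simp [pvComb2, pvFull]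
  | cons x xs ih =>
    simp only [pvComb2, pvFull, List.map_append, List.sum_append, List.map_map,
      List.map_cons, List.sum_cons] at *
    have hsymm : (xs.map (fun a => |a - x|)).sum = (xs.map (fun a => |x - a|)).sum := by
      apply congrArg
      apply List.map_congr_left
      intro a _
      exact abs_sub_comm a x
    have hsplit : (xs.map (fun a => |a - x| + (xs.map (fun b => |a - b|)).sum)).sum
        = (xs.map (fun a => |a - x|)).sum + (xs.map (fun a => (xs.map (fun b => |a - b|)).sum)).sum :=
      pv_sum_map_add xs _ _
    simp only [Function.comp_def, hsplit] at *
    rw [hsymm]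
    simp only [sub_self, abs_zero, zero_add]
    linarith [ih]

theorem pv_full_perm (xs ys : List Int) (h : xs.Perm ys) : pvFull xs xs = pvFull ys ys := by
  unfold pvFull
  have inner : ∀ a : Int, (xs.map (fun b => |a - b|)).sum = (ys.map (fun b => |a - b|)).sum :=
    fun a => (h.map (fun b => |a - b|)).sum_eq
  calc (xs.map (fun a => (xs.map (fun b => |a - b|)).sum)).sum
      = (xs.map (fun a => (ys.map (fun b => |a - b|)).sum)).sum := by
        apply congrArg; apply List.map_congr_left; intro a _; exact inner a
    _ = (ys.map (fun a => (ys.map (fun b => |a - b|)).sum)).sum :=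
        (h.map (fun a => (ys.map (fun b => |a - b|)).sum)).sum_eq

-- shift the start of enumerate into the summand
theorem pv_enum_shift (l : List Int) (s : Int) (f : Int → Int → Int) :
    ((PySem.List.enumerate l s).map (fun p => f p.1 p.2)).sum
      = ((PySem.List.enumerate l 0).map (fun p => f (p.1 + s) p.2)).sum := by
  induction l generalizing s f with
  | nil => simp [PySem.List.enumerate_nil]
  | cons x xs ih =>
    rw [PySem.List.enumerate_cons, PySem.List.enumerate_cons]
    simp only [List.map_cons, List.sum_cons, zero_add]
    rw [ih (s + 1) f, ih 1 (fun a b => f (a + s) b)]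
    congr 1
    apply congrArg
    apply List.map_congr_left
    intro p _
    ring_nf

theorem pv_sum_map_sub_const (xs : List Int) (c : Int) :
    (xs.map (fun y => y - c)).sum = xs.sum - (xs.length : Int) * c := by
  induction xs with
  | nil => simp
  | cons x xs ih => simp [ih]; push_cast; ring

-- on a sorted list the comb2 sum equals B's weighted enumerate sum
theorem pv_sorted_ac (l : List Int) (h : l.Pairwise (· ≤ ·)) :
    ((pvComb2 l).map (fun p => |p.1 - p.2|)).sum
      = ((PySem.List.enumerate l 0).map (fun p => (2 * p.1 - ((l.length : Int) - 1)) * p.2)).sum := by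
  induction l with
  | nil => simp [pvComb2, PySem.List.enumerate_nil]
  | cons x xs ih =>
    rcases List.pairwise_cons.mp h with ⟨hx, hxs⟩
    rw [PySem.List.enumerate_cons]
    simp only [pvComb2, List.map_append, List.map_map, List.map_cons, List.sum_cons,
      List.sum_append, List.length_cons]
    have habs : (xs.map ((fun p : Int × Int => |p.1 - p.2|) ∘ fun y => (x, y))).sum
        = (xs.map (fun y => y - x)).sum := by
      apply congrArg
      apply List.map_congr_left
      intro y hy
      simp only [Function.comp_apply]
      rw [abs_sub_comm, abs_of_nonneg (by linarith [hx y hy])]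
    rw [habs, pv_sum_map_sub_const, ih hxs]
    simp only [zero_add, Nat.cast_add, Nat.cast_one]
    rw [pv_enum_shift xs 1 (fun a b => (2 * a - ((xs.length : Int) + 1 - 1)) * b)]
    have hsplit : ((PySem.List.enumerate xs 0).map
        (fun p => (2 * (p.1 + 1) - ((xs.length : Int) + 1 - 1)) * p.2)).sum
        = ((PySem.List.enumerate xs 0).map (fun p => (2 * p.1 - ((xs.length : Int) - 1)) * p.2)).sum
          + ((PySem.List.enumerate xs 0).map (fun p => p.2)).sum := by
      rw [← pv_sum_map_add]
      apply congrArg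
      apply List.map_congr_left
      intro p _
      ring
    have hsnd : ((PySem.List.enumerate xs 0).map (fun p : Int × Int => p.2)).sum = xs.sum := by
      rw [PySem.List.map_snd_enumerate]
    rw [hsplit, hsnd]
    push_cast
    ring

theorem pv_ac_eq (red : List Int) :
    ((pvComb2 red).map (fun p => |p.1 - p.2|)).sum
      = ((PySem.List.enumerate (PySem.List.sorted red (fun x => x) false) 0).map
          (fun p => (2 * p.1 - ((red.length : Int) - 1)) * p.2)).sum := by
  set s := PySem.List.sorted red (fun x => x) false with hs
  have hperm : s.Perm red := PySem.List.sorted_perm red (fun x => x) false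
  have hpw : s.Pairwise (· ≤ ·) := by
    have := PySem.List.sorted_pairwise red (fun x => x)
    simpa [hs] using this
  have hlen : s.length = red.length := hperm.length_eq
  have h1 : 2 * ((pvComb2 red).map (fun p => |p.1 - p.2|)).sum
      = 2 * ((pvComb2 s).map (fun p => |p.1 - p.2|)).sum := by
    rw [pv_two_comb2, pv_two_comb2, pv_full_perm s red hperm]
  have h2 := pv_sorted_ac s hpw
  rw [hlen] at h2
  omega

-- ===== VERDICT (by name: the statement is the Claim_ definition above) =====
theorem get_number_analysis_spec : Claim_equal_get_number_analysis := by
  intro numbers _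
  unfold Spec_get_number_analysis get_number_analysis get_number_analysis_alt
  obtain ⟨red, blue⟩ := numbers
  simp only [pv_consec_eq, pv_consec_alt_eq, pv_sum_mod2, pv_sum_big, pv_ac_eq]
  have hpar := pv_count_parity red
  have hsize := pv_count_size red
  simp only [List.countP_eq_length_filter] at hpar hsize
  simp only [List.cons.injEq, Prod.mk.injEq, and_true, true_and]
  simp only [List.countP_eq_length_filter]
  refine ⟨trivial, by omega, trivial, by omega⟩
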